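-- pv_equiv track=rewrite | github.com/aokimi0/parallel-programming | lab3-pthread/src/find_large_primes_v3.py | verify_ntt_form
-- ===== SOURCE A (Python) =====
-- def verify_ntt_form(p):
--     """验证p是否为a×4^k+1的形式"""
--     if p <= 1:
--         return False, 0, 0
--
--     temp = p - 1
--     k = 0
--
--     while temp % 4 == 0:
--         temp //= 4
--         k += 1
--
--     if k > 0:
--         a = temp
--         if a * (4 ** k) + 1 == p:
--             return True, a, k
--
--     return False, 0, 0
-- ===== SOURCE B (Python) =====
-- def verify_ntt_form(p):
--     """验证p是否为a×4^k+1的形式"""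
--     if p <= 1:
--         return False, 0, 0
--     n = p - 1
--     tz = (n & -n).bit_length() - 1   # number of trailing zero bits of n
--     k = tz // 2
--     if k == 0:
--         return False, 0, 0
--     return True, n >> (2 * k), k
-- ===== Notes on version B (the rewrite author's own statement) =====
-- stated objective: idiomatic
-- what changed: Replaced the repeated divide-by-4 while-loop with a closed-form bit computation: the trailing-zero count of p-1 comes from (n & -n).bit_length()-1, k is its half, and a is a single shift n >> 2k; the always-true reconstruction check is dropped.
import Mathlib
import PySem

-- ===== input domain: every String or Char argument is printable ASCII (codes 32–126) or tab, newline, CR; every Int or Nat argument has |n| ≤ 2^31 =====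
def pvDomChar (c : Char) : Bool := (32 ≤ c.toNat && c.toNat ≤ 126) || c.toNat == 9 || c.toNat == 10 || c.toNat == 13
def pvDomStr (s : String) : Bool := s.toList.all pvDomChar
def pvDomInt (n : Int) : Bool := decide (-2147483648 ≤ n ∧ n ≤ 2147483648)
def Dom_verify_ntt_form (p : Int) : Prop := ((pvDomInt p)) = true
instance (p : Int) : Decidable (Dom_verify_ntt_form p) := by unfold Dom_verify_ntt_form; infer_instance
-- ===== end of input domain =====

-- B replaces A's divide-by-4 while-loop by the closed-form bit computation
-- tz = (n & -n).bit_length() - 1, k = tz // 2, a = n >> 2k (idiomatic; the always-true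
-- reconstruction check of A is dropped).

-- ===== PORT A =====
-- while temp % 4 == 0: temp //= 4; k += 1
-- (the extra 'temp ≠ 0' in the guard only totalises the otherwise-divergent case temp = 0,
--  which verify_ntt_form never reaches: there temp = p - 1 ≥ 1)
def loopA (temp k : Int) : Int × Int :=
  if h : PySem.Int.mod temp 4 = 0 ∧ temp ≠ 0 then
    loopA (PySem.Int.floordiv temp 4) (k + 1)
  else (temp, k)
termination_by temp.natAbs
decreasing_by
  obtain ⟨h4, hne⟩ := h
  obtain ⟨t, rfl⟩ := (PySem.Int.mod_eq_zero_iff_dvd temp 4).1 h4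
  have ht : t ≠ 0 := by rintro rfl; simp at hne
  have h1 : PySem.Int.floordiv (4 * t) 4 = t := by
    simp [PySem.Int.floordiv, mul_comm, Int.mul_fdiv_cancel t (by norm_num : (4:Int) ≠ 0)]
  rw [h1, Int.natAbs_mul]
  have h2 : t.natAbs ≠ 0 := Int.natAbs_ne_zero.mpr ht
  have h3 : (4 : Int).natAbs = 4 := rfl
  rw [h3]; omega

def verify_ntt_form (p : Int) : Bool × Int × Int :=
  if p ≤ 1 then (false, 0, 0)
  else
    let r := loopA (p - 1) 0
    let temp := r.1
    let k := r.2
    if 0 < k then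
      let a := temp
      -- 4 ** k: k ≥ 0 always holds here (k starts at 0 and is only incremented)
      if a * 4 ^ k.toNat + 1 = p then (true, a, k) else (false, 0, 0)
    else (false, 0, 0)

-- ===== PORT B =====
def verify_ntt_form_alt (p : Int) : Bool × Int × Int :=
  if p ≤ 1 then (false, 0, 0)
  else
    let n := p - 1
    let tz : Int := (PySem.Int.bitLength (PySem.Int.band n (-n)) : Int) - 1
    let k := PySem.Int.floordiv tz 2
    if k = 0 then (false, 0, 0)
    else (true, n >>> (2 * k).toNat, k)   -- n >> (2*k); 2*k ≥ 0 always holds here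

-- ===== PRECONDITION & SPEC =====
def Spec_verify_ntt_form (p : Int) (out : Bool × Int × Int) : Prop := out = verify_ntt_form_alt p
instance (p : Int) (out : Bool × Int × Int) : Decidable (Spec_verify_ntt_form p out) := by unfold Spec_verify_ntt_form; infer_instance

-- ===== CLAIM (what is proved, stated in full; the proofs are below) =====
def Claim_equal_verify_ntt_form : Prop := ∀ (p : Int), Dom_verify_ntt_form p → Spec_verify_ntt_form p (verify_ntt_form p)

-- ===== LEMMAS AND PROOFS =====

-- trailing-zero count of a natural number
def tzc (m : ℕ) : ℕ :=
  if h : m ≠ 0 ∧ m % 2 = 0 then tzc (m / 2) + 1 else 0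
termination_by m
decreasing_by omega

theorem tzc_odd {m : ℕ} (h : m % 2 = 1) : tzc m = 0 := by
  rw [tzc]; simp [h]

theorem tzc_even {m : ℕ} (h0 : m ≠ 0) (h2 : m % 2 = 0) : tzc m = tzc (m / 2) + 1 := by
  rw [tzc]; simp [h0, h2]

theorem pow_tzc_dvd (m : ℕ) : 2 ^ tzc m ∣ m := by
  induction m using Nat.strong_induction_on with
  | _ m ih =>
    rcases Nat.eq_zero_or_pos m with rfl | hm
    · simp
    rcases Nat.even_or_odd m with he | ho
    · have h2 : m % 2 = 0 := Nat.even_iff.1 he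
      rw [tzc_even (by omega) h2, pow_succ]
      obtain ⟨c, hc⟩ := ih (m / 2) (by omega)
      refine ⟨c, ?_⟩
      calc m = 2 * (m / 2) := by omega
        _ = 2 * (2 ^ tzc (m / 2) * c) := by rw [← hc]
        _ = 2 ^ tzc (m / 2) * 2 * c := by ring
    · rw [tzc_odd (Nat.odd_iff.1 ho)]; simp

theorem and_pred_odd {m : ℕ} (h : m % 2 = 1) : m &&& (m - 1) = m - 1 := by
  apply Nat.eq_of_testBit_eq
  intro i
  cases i with
  | zero =>
    have h1 : (m - 1) % 2 = 0 := by omega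
    simp only [Nat.testBit_zero, h1]
    simp
    omega
  | succ i =>
    have h1 : m / 2 = (m - 1) / 2 := by omega
    rw [Nat.testBit_and, Nat.testBit_add_one, Nat.testBit_add_one, h1, Bool.and_self]

theorem and_pred_even {m : ℕ} (h2 : m % 2 = 0) :
    m &&& (m - 1) = 2 * ((m / 2) &&& (m / 2 - 1)) := by
  apply Nat.eq_of_testBit_eq
  intro i
  cases i with
  | zero =>
    have h1 : 2 * (m / 2 &&& (m / 2 - 1)) % 2 = 0 := by omega
    simp only [Nat.testBit_zero, h1]
    simp
    omega
  | succ i =>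
    have h1 : (m - 1) / 2 = m / 2 - 1 := by omega
    have h2' : 2 * (m / 2 &&& (m / 2 - 1)) / 2 = m / 2 &&& (m / 2 - 1) := by omega
    rw [Nat.testBit_and, Nat.testBit_add_one, Nat.testBit_add_one, Nat.testBit_add_one, h1, h2', Nat.testBit_and]

theorem lowbit_eq (m : ℕ) (hm : 0 < m) : m - (m &&& (m - 1)) = 2 ^ tzc m := by
  induction m using Nat.strong_induction_on with
  | _ m ih =>
    rcases Nat.even_or_odd m with he | ho
    · have h2 : m % 2 = 0 := Nat.even_iff.1 he
      have hm2 : 0 < m / 2 := by omega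
      rw [and_pred_even h2, tzc_even (by omega) h2, pow_succ]
      have hle : (m / 2) &&& (m / 2 - 1) ≤ m / 2 := Nat.and_le_left
      have := ih (m / 2) (by omega) hm2
      omega
    · have h1 : m % 2 = 1 := Nat.odd_iff.1 ho
      rw [and_pred_odd h1, tzc_odd h1]
      omega

theorem band_self_neg (n : ℕ) (hn : 0 < n) :
    PySem.Int.band (n : Int) (-(n : Int)) = ((2 ^ tzc n : ℕ) : Int) := by
  have hneg : ¬ (0 ≤ -(n : Int)) := by omega
  have : (-(-(n:Int)) - 1).toNat = n - 1 := by omega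
  rw [PySem.Int.band]
  simp only [Int.toNat_natCast, hneg, if_false, if_pos (by positivity : (0:Int) ≤ (n:Int)), this]
  exact_mod_cast lowbit_eq n hn

theorem bitLength_two_pow (v : ℕ) : PySem.Int.bitLength ((2 ^ v : ℕ) : Int) = v + 1 := by
  induction v with
  | zero => decide
  | succ v ih =>
    rw [PySem.Int.bitLength_natCast (m := 2 ^ (v+1)) (by positivity)]
    have h : 2 ^ (v + 1) / 2 = 2 ^ v := by rw [pow_succ]; omega
    rw [h, ih]

theorem tzc_le_one_of_not_four_dvd {m : ℕ} (h : ¬ (4 ∣ m)) : tzc m ≤ 1 := by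
  rcases Nat.even_or_odd m with he | ho
  · have h2 : m % 2 = 0 := Nat.even_iff.1 he
    have h0 : m ≠ 0 := by rintro rfl; exact h ⟨0, rfl⟩
    rw [tzc_even h0 h2]
    have : (m / 2) % 2 = 1 := by omega
    rw [tzc_odd this]
  · rw [tzc_odd (Nat.odd_iff.1 ho)]; omega

theorem tzc_div_four {m : ℕ} (h0 : m ≠ 0) (h4 : 4 ∣ m) : tzc m = tzc (m / 4) + 2 := by
  obtain ⟨c, rfl⟩ := h4
  have hc : c ≠ 0 := by rintro rfl; simp at h0
  rw [tzc_even h0 (by omega), show 4 * c / 2 = 2 * c by omega,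
      tzc_even (by omega) (by omega), show 2 * c / 2 = c by omega,
      show 4 * c / 4 = c by omega]

theorem intCast_shiftRight (n s : ℕ) : ((n : Int) >>> s) = ((n >>> s : ℕ) : Int) := rfl

theorem loopA_spec (m : ℕ) (hm : 0 < m) (k : Int) :
    loopA (m : Int) k = (((m / 4 ^ (tzc m / 2) : ℕ) : Int), k + ((tzc m / 2 : ℕ) : Int)) := by
  induction m using Nat.strong_induction_on generalizing k with
  | _ m ih =>
    by_cases h4 : (4 : ℕ) ∣ m
    · have hguard : PySem.Int.mod (m : Int) 4 = 0 ∧ (m : Int) ≠ 0 :=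
        ⟨(PySem.Int.mod_eq_zero_iff_dvd _ _).2 (by exact_mod_cast h4),
         Int.natCast_ne_zero.2 (by omega)⟩
      rw [loopA, dif_pos hguard]
      have hdiv : PySem.Int.floordiv (m : Int) 4 = ((m / 4 : ℕ) : Int) := by
        exact_mod_cast PySem.Int.floordiv_natCast m 4
      rw [hdiv]
      have hm4 : 0 < m / 4 := by
        obtain ⟨c, rfl⟩ := h4
        have : c ≠ 0 := by rintro rfl; omega
        omega
      rw [ih (m / 4) (by omega) hm4]
      have htz := tzc_div_four (by omega) h4
      have hj : tzc m / 2 = tzc (m / 4) / 2 + 1 := by omega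
      have hfst : m / 4 / 4 ^ (tzc (m / 4) / 2) = m / 4 ^ (tzc m / 2) := by
        rw [hj, pow_succ, Nat.div_div_eq_div_mul, mul_comm]
      have hsnd : k + 1 + ((tzc (m / 4) / 2 : ℕ) : Int) = k + ((tzc m / 2 : ℕ) : Int) := by
        push_cast [hj]; ring
      simp only [Prod.mk.injEq]
      exact ⟨by exact_mod_cast congrArg (Nat.cast (R := ℤ)) hfst, hsnd⟩
    · have hguard : ¬ (PySem.Int.mod (m : Int) 4 = 0 ∧ (m : Int) ≠ 0) := by
        rintro ⟨hmod, -⟩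
        rw [PySem.Int.mod_eq_zero_iff_dvd] at hmod
        exact h4 (by exact_mod_cast hmod)
      rw [loopA, dif_neg hguard]
      have h : tzc m / 2 = 0 := by have := tzc_le_one_of_not_four_dvd h4; omega
      simp [h]

-- ===== VERDICT (by name: the statement is the Claim_ definition above) =====
theorem verify_ntt_form_spec : Claim_equal_verify_ntt_form := by
  intro p _
  unfold Spec_verify_ntt_form verify_ntt_form verify_ntt_form_alt
  by_cases hp : p ≤ 1
  · simp [hp]
  · simp only [hp, if_false]
    have hp1 : 1 < p := by omega
    have hpn : p - 1 = (((p - 1).toNat : ℕ) : Int) := by omega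
    set n : ℕ := (p - 1).toNat with hn
    have hn0 : 0 < n := by omega
    rw [hpn, loopA_spec n hn0 0, band_self_neg n hn0, bitLength_two_pow]
    have htz : ((tzc n + 1 : ℕ) : Int) - 1 = ((tzc n : ℕ) : Int) := by push_cast; ring
    have hfd : PySem.Int.floordiv ((tzc n : ℕ) : Int) 2 = ((tzc n / 2 : ℕ) : Int) := by
      exact_mod_cast PySem.Int.floordiv_natCast (tzc n) 2
    rw [htz, hfd]
    simp only [zero_add]
    by_cases hj0 : tzc n / 2 = 0
    · rw [hj0]
      norm_num
    · have hjpos : 0 < tzc n / 2 := Nat.pos_of_ne_zero hj0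
      rw [if_pos (show (0:Int) < ((tzc n / 2 : ℕ) : Int) by exact_mod_cast hjpos)]
      have hdvd : 4 ^ (tzc n / 2) ∣ n := by
        have h1 : (2 : ℕ) ^ (2 * (tzc n / 2)) ∣ 2 ^ tzc n := pow_dvd_pow 2 (by omega)
        have h2 : (4 : ℕ) ^ (tzc n / 2) = 2 ^ (2 * (tzc n / 2)) := by
          rw [show (4 : ℕ) = 2 ^ 2 by norm_num, ← pow_mul, mul_comm]
        rw [h2]
        exact h1.trans (pow_tzc_dvd n)
      have hmul : ((n / 4 ^ (tzc n / 2) : ℕ) : Int) * (4 : Int) ^ (tzc n / 2) = (n : Int) := by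
        have h := Nat.div_mul_cancel hdvd
        exact_mod_cast congrArg (Nat.cast (R := ℤ)) h
      have htn : (((tzc n / 2 : ℕ) : Int)).toNat = tzc n / 2 := Int.toNat_natCast _
      have hrecon : ((n / 4 ^ (tzc n / 2) : ℕ) : Int) * 4 ^ ((((tzc n / 2 : ℕ) : Int)).toNat) + 1 = p := by
        rw [htn, hmul]; omega
      rw [if_pos hrecon, if_neg (show ¬ ((( tzc n / 2 : ℕ) : Int) = 0) by exact_mod_cast hj0)]
      have hshift : ((n : Int) >>> ((2 * ((tzc n / 2 : ℕ) : Int)).toNat)) = ((n / 4 ^ (tzc n / 2) : ℕ) : Int) := by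
        have h2j : (2 * ((tzc n / 2 : ℕ) : Int)).toNat = 2 * (tzc n / 2) := by omega
        rw [h2j, intCast_shiftRight]
        congr 1
        rw [Nat.shiftRight_eq_div_pow]
        congr 1
        rw [show (4 : ℕ) = 2 ^ 2 by norm_num, ← pow_mul, mul_comm]
      rw [hshift]
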